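-- pv_equiv track=rewrite | github.com/vercel/vercel-py | src/vercel/_internal/sandbox/models.py | _merge_headers_case_insensitively
-- ===== SOURCE A (Python) =====
-- from collections.abc import Mapping, Sequence
--
-- def _merge_headers_case_insensitively(
--     headers: Sequence[Mapping[str, str] | None],
-- ) -> dict[str, str]:
--     merged: dict[str, str] = {}
--     lower_to_names: dict[str, set[str]] = {}
--     for header_map in headers:
--         if not header_map:
--             continue
--
--         current_lower_to_names: dict[str, set[str]] = {}
--         for name, value in header_map.items():
--             merged[name] = value
--             current_lower_to_names.setdefault(name.lower(), set()).add(name)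
--
--         for lower_name, current_names in current_lower_to_names.items():
--             for previous_name in lower_to_names.get(lower_name, set()) - current_names:
--                 merged.pop(previous_name, None)
--             lower_to_names[lower_name] = current_names
--
--     return merged
-- ===== SOURCE B (Python) =====
-- def _merge_headers_case_insensitively(headers):
--     merged = []  # list of (name, value), kept in the same order the merged dict would have
--     for header_map in headers:
--         if not header_map:
--             continue
--         lowers = {name.lower() for name in header_map}
--         merged = [
--             (name, header_map[name]) if name in header_map else (name, value)
--             for name, value in merged
--             if name in header_map or name.lower() not in lowers
--         ]
--         seen = {name for name, _ in merged}
--         merged.extend(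
--             (name, value) for name, value in header_map.items() if name not in seen
--         )
--     return dict(merged)
-- ===== Notes on version B (the rewrite author's own statement) =====
-- stated objective: simpler
-- what changed: B drops A's dict-plus-lower_to_names cross-map bookkeeping and keeps a single ordered list of (name, value) pairs, rebuilding it per header map with one comprehension (keep/update names present in the map, drop names claimed under another casing) followed by an extend with the map's new names; this is clearer but rescans the merged list for every map, so it is slower on inputs with many maps.
import Mathlib
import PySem

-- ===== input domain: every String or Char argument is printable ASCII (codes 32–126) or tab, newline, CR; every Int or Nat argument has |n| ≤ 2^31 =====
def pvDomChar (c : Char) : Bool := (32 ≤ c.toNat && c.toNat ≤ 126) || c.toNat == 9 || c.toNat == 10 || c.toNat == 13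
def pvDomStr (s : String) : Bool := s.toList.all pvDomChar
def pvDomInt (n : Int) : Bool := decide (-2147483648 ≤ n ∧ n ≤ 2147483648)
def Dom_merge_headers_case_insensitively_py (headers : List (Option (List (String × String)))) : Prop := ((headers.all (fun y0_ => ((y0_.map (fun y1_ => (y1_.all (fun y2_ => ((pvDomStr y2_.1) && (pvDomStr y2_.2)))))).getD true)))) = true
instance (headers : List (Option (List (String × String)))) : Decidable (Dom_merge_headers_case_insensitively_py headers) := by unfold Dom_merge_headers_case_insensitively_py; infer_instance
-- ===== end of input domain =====

-- B replaces A's dict + cross-map lower_to_names bookkeeping by a single list state rebuilt per map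
-- (filter/update the kept entries, then extend with the map's new names): simpler state, same result.


-- ===== PORT A =====
-- one header_map step of A: the two inner loops (insert items while grouping names by
-- lowercase into current_lower_to_names, then pop stale casings and record the groups)
def mergeA_step (st : PySem.Dict String String × PySem.Dict String (PySem.Set String))
    (hm : Option (List (String × String))) :
    PySem.Dict String String × PySem.Dict String (PySem.Set String) :=
  match hm with
  | none => st                                   -- `if not header_map: continue`
  | some items =>
    if items = [] then st                        -- empty mapping is falsy too
    else
      -- for name, value in header_map.items(): merged[name] = value; current_lower_to_names.setdefault(name.lower(), set()).add(name)
      let p1 := items.foldl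
        (fun (p : PySem.Dict String String × PySem.Dict String (PySem.Set String)) nv =>
          (p.1.insert nv.1 nv.2,
           p.2.modify (PySem.Str.lower nv.1) PySem.Set.empty (fun s => PySem.Set.add s nv.1)))
        (st.1, PySem.Dict.empty)
      -- for lower_name, current_names in current_lower_to_names.items(): pop previous names, record group
      p1.2.items.foldl
        (fun (p : PySem.Dict String String × PySem.Dict String (PySem.Set String)) lc =>
          ((PySem.Set.diff (p.2.getD lc.1 PySem.Set.empty) lc.2).foldl
              (fun m prev => m.erase prev) p.1,   -- merged.pop(previous_name, None)
           p.2.insert lc.1 lc.2))                 -- lower_to_names[lower_name] = current_names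
        (p1.1, st.2)

def merge_headers_case_insensitively_py (headers : List (Option (List (String × String)))) : List (String × String) :=
  (headers.foldl mergeA_step (PySem.Dict.empty, PySem.Dict.empty)).1.items

-- ===== PORT B =====
-- one header_map step of B: rebuild the kept entries by one comprehension, then extend
def mergeB_step (merged : List (String × String)) (hm : Option (List (String × String))) :
    List (String × String) :=
  match hm with
  | none => merged
  | some items =>
    if items = [] then merged
    else
      let d := PySem.Dict.mk items               -- the header_map Mapping (keys unique under Pre_)
      let lowers := PySem.Set.ofList (items.map (fun nv => PySem.Str.lower nv.1))
      let kept := merged.filterMap (fun nv =>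
        match d.get? nv.1 with
        | some w => some (nv.1, w)                -- name in header_map: keep, value updated
        | none =>
          if PySem.Set.contains lowers (PySem.Str.lower nv.1) then none   -- claimed under another casing
          else some nv)                           -- untouched lowercase: keep
      let seen := PySem.Set.ofList (kept.map (fun nv => nv.1))
      kept ++ items.filter (fun nv => !(PySem.Set.contains seen nv.1))

def merge_headers_case_insensitively_py_alt (headers : List (Option (List (String × String)))) : List (String × String) :=
  headers.foldl mergeB_step []

-- ===== PRECONDITION & SPEC =====
-- Pre_ excludes inputs where some inner association list repeats a key: such a list does not
-- represent any Python Mapping (a dict collapses duplicate keys before A ever runs).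
def Pre_merge_headers_case_insensitively_py (headers : List (Option (List (String × String)))) : Prop :=
  ∀ o ∈ headers, ((o.getD []).map Prod.fst).Nodup
instance (headers : List (Option (List (String × String)))) : Decidable (Pre_merge_headers_case_insensitively_py headers) := by unfold Pre_merge_headers_case_insensitively_py; infer_instance

def pvWitness_merge_headers_case_insensitively_py : (List (Option (List (String × String)))) :=
  [some [("Content-Type", "a"), ("X-Y", "b")], none, some [("content-type", "c")]]

def Spec_merge_headers_case_insensitively_py (headers : List (Option (List (String × String)))) (out : List (String × String)) : Prop := out = merge_headers_case_insensitively_py_alt headers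
instance (headers : List (Option (List (String × String)))) (out : List (String × String)) : Decidable (Spec_merge_headers_case_insensitively_py headers out) := by unfold Spec_merge_headers_case_insensitively_py; infer_instance

-- ===== CLAIM (what is proved, stated in full; the proofs are below) =====
def Claim_equal_merge_headers_case_insensitively_py : Prop := ∀ (headers : List (Option (List (String × String)))), Dom_merge_headers_case_insensitively_py headers → Pre_merge_headers_case_insensitively_py headers → Spec_merge_headers_case_insensitively_py headers (merge_headers_case_insensitively_py headers)

-- ===== LEMMAS AND PROOFS =====
-- generic helpers
theorem pvFoldlPair {α β γ : Type} (f : α → γ → α) (g : β → γ → β) :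
    ∀ (l : List γ) (a : α) (b : β),
      (l.foldl (fun p x => (f p.1 x, g p.2 x)) (a, b)) = (l.foldl f a, l.foldl g b) := by
  intro l
  induction l with
  | nil => intro a b; rfl
  | cons x xs ih => intro a b; simp [List.foldl, ih]

theorem pvFilterMapEq {α β : Type} (f : α → Option β) (p : α → Bool) (g : α → β) :
    ∀ (l : List α), (∀ x ∈ l, f x = if p x then some (g x) else none) →
      l.filterMap f = (l.filter p).map g := by
  intro l
  induction l with
  | nil => intro _; rfl
  | cons x xs ih =>
    intro h
    have hx := h x (by simp)
    by_cases hp : p x = true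
    · simp [hx, hp, ih (fun y hy => h y (by simp [hy]))]
    · simp at hp
      simp [hx, hp, ih (fun y hy => h y (by simp [hy]))]

-- fold of erase = filter
theorem pvFoldlErase (ns : List String) :
    ∀ (m : PySem.Dict String String),
      (ns.foldl (fun m n => m.erase n) m).items
        = m.items.filter (fun q => !(ns.contains q.1)) := by
  induction ns with
  | nil => intro m; simp
  | cons n ns ih =>
    intro m
    rw [List.foldl_cons, ih]
    show ((PySem.Dict.erase m n).items).filter _ = _
    simp only [PySem.Dict.erase, List.filter_filter]
    apply List.filter_congr
    intro q _
    by_cases h1 : q.1 = n <;> simp [h1]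

-- value update applied to an existing entry by phase 1 of a step of A
def pvUpd (items : List (String × String)) (q : String × String) : String × String :=
  match items.find? (fun p => p.1 == q.1) with
  | some p => (q.1, p.2)
  | none => q

theorem pvUpd_nil (q : String × String) : pvUpd [] q = q := rfl

theorem pvUpd_fst (items : List (String × String)) (q : String × String) :
    (pvUpd items q).1 = q.1 := by
  unfold pvUpd
  cases h : items.find? (fun p => p.1 == q.1) <;> simp

theorem pvUpd_cons_of_ne (nv : String × String) (rest : List (String × String))
    (q : String × String) (h : q.1 ≠ nv.1) : pvUpd (nv :: rest) q = pvUpd rest q := by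
  unfold pvUpd
  rw [List.find?_cons_of_neg (by simp [Ne.symm h])]

theorem pvUpd_of_not_mem (items : List (String × String)) (q : String × String)
    (h : q.1 ∉ items.map Prod.fst) : pvUpd items q = q := by
  unfold pvUpd
  rw [List.find?_eq_none.mpr]
  intro p hp
  simp only [beq_iff_eq]
  intro he
  exact h (he ▸ List.mem_map_of_mem hp)

-- phase 1: folding insert over items with distinct keys
theorem pvFoldlInsert (items : List (String × String)) :
    ∀ (m : PySem.Dict String String), (items.map Prod.fst).Nodup →
      (items.foldl (fun m nv => m.insert nv.1 nv.2) m).items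
        = m.items.map (pvUpd items) ++ items.filter (fun nv => !(m.contains nv.1)) := by
  induction items with
  | nil =>
    intro m _
    rw [List.map_congr_left (fun q _ => pvUpd_nil q)]
    simp
  | cons nv rest ih =>
    intro m hnd
    simp only [List.map_cons, List.nodup_cons] at hnd
    obtain ⟨hnotin, hndr⟩ := hnd
    rw [List.foldl_cons, ih _ hndr]
    have hrest_ne : ∀ p ∈ rest, p.1 ≠ nv.1 := by
      intro p hp he
      exact hnotin (he ▸ List.mem_map_of_mem hp)
    have hfilter : rest.filter (fun x => !(m.insert nv.1 nv.2).contains x.1)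
        = rest.filter (fun x => !m.contains x.1) := by
      apply List.filter_congr
      intro p hp
      rw [PySem.Dict.contains_insert]
      simp [hrest_ne p hp]
    by_cases hc : m.contains nv.1 = true
    · -- overwrite in place
      have hitems : (m.insert nv.1 nv.2).items
          = m.items.map (fun p => if (p.1 == nv.1) = true then (nv.1, nv.2) else p) := by
        simp [PySem.Dict.insert, hc]
      rw [hitems, List.map_map, hfilter]
      have hrhsf : (nv :: rest).filter (fun x => !m.contains x.1)
          = rest.filter (fun x => !m.contains x.1) := by
        rw [List.filter_cons]
        simp [hc]
      rw [hrhsf]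
      congr 1
      apply List.map_congr_left
      intro q _
      simp only [Function.comp_apply]
      by_cases hq : q.1 = nv.1
      · rw [if_pos (by simp [hq]), pvUpd_of_not_mem rest (nv.1, nv.2) hnotin]
        have h1 : pvUpd (nv :: rest) q = (q.1, nv.2) := by
          unfold pvUpd
          rw [List.find?_cons_of_pos (by simp [hq])]
        rw [h1, hq]
      · rw [if_neg (by simp [hq]), pvUpd_cons_of_ne nv rest q hq]
    · -- fresh key: append at the end
      have hitems : (m.insert nv.1 nv.2).items = m.items ++ [(nv.1, nv.2)] := by
        simp [PySem.Dict.insert, hc]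
      have hm_ne : ∀ q ∈ m.items, q.1 ≠ nv.1 := by
        intro q hq he
        apply hc
        simp only [PySem.Dict.contains, List.any_eq_true]
        exact ⟨q, hq, by simp [he]⟩
      rw [hitems, List.map_append, hfilter]
      have h2 : pvUpd rest (nv.1, nv.2) = (nv.1, nv.2) :=
        pvUpd_of_not_mem _ _ hnotin
      have h1 : m.items.map (pvUpd rest) = m.items.map (pvUpd (nv :: rest)) :=
        List.map_congr_left (fun q hq => (pvUpd_cons_of_ne nv rest q (hm_ne q hq)).symm)
      rw [h1]
      simp only [List.map_cons, List.map_nil, h2, List.append_assoc]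
      congr 1
      rw [List.filter_cons]
      simp [hc]

-- membership in the groups built by `setdefault(name.lower(), set()).add(name)`
theorem pvCurGetD (items : List (String × String)) :
    ∀ (c : PySem.Dict String (PySem.Set String)) (l n : String),
      (n ∈ (items.foldl (fun c nv =>
              c.modify (PySem.Str.lower nv.1) PySem.Set.empty (fun s => PySem.Set.add s nv.1)) c).getD l PySem.Set.empty
        ↔ n ∈ c.getD l PySem.Set.empty ∨ (n ∈ items.map Prod.fst ∧ PySem.Str.lower n = l)) := by
  induction items with
  | nil => intro c l n; simp
  | cons nv rest ih =>
    intro c l n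
    rw [List.foldl_cons, ih]
    rw [PySem.Dict.getD_modify]
    by_cases hl : l = PySem.Str.lower nv.1
    · rw [if_pos hl, PySem.Set.mem_add, ← hl]
      constructor
      · rintro (⟨h | h⟩ | h)
        · exact Or.inl h
        · exact Or.inr ⟨by simp [h], by rw [h, hl]⟩
        · exact Or.inr ⟨by simp [h.1], h.2⟩
      · rintro (h | ⟨hm, he⟩)
        · exact Or.inl (Or.inl h)
        · simp only [List.map_cons, List.mem_cons] at hm
          rcases hm with hm | hm
          · exact Or.inl (Or.inr hm)
          · exact Or.inr ⟨hm, he⟩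
    · rw [if_neg hl]
      constructor
      · rintro (h | h)
        · exact Or.inl h
        · exact Or.inr ⟨by simp [h.1], h.2⟩
      · rintro (h | ⟨hm, he⟩)
        · exact Or.inl h
        · simp only [List.map_cons, List.mem_cons] at hm
          rcases hm with hm | hm
          · exact absurd (hm ▸ he) (fun x => hl x.symm)
          · exact Or.inr ⟨hm, he⟩

-- the keys of the group dict are the lowercased names
theorem pvCurKeys (items : List (String × String)) :
    ∀ (c : PySem.Dict String (PySem.Set String)) (l : String),
      (l ∈ (items.foldl (fun c nv =>
              c.modify (PySem.Str.lower nv.1) PySem.Set.empty (fun s => PySem.Set.add s nv.1)) c).keys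
        ↔ l ∈ c.keys ∨ l ∈ items.map (fun nv => PySem.Str.lower nv.1)) := by
  induction items with
  | nil => intro c l; simp
  | cons nv rest ih =>
    intro c l
    rw [List.foldl_cons, ih]
    unfold PySem.Dict.modify
    rw [PySem.Dict.mem_keys_insert]
    simp only [List.map_cons, List.mem_cons]
    tauto

theorem pvAnyCongr {α : Type} (l : List α) (f g : α → Bool) (h : ∀ x ∈ l, f x = g x) :
    l.any f = l.any g := by
  induction l with
  | nil => rfl
  | cons x xs ih => rw [List.any_cons, List.any_cons, h x (by simp), ih (fun y hy => h y (by simp [hy]))]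

-- phase 2: the pop loop filters merged, the group dict is recorded into lower_to_names
theorem pvPhase2 (cs : List (String × PySem.Set String)) :
    ∀ (m : PySem.Dict String String) (l2n : PySem.Dict String (PySem.Set String)),
      (cs.map Prod.fst).Nodup →
      (cs.foldl (fun p lc =>
          ((PySem.Set.diff (p.2.getD lc.1 PySem.Set.empty) lc.2).foldl
              (fun m prev => m.erase prev) p.1,
           p.2.insert lc.1 lc.2)) (m, l2n)).1.items
        = m.items.filter (fun q =>
            !(cs.any (fun lc => ((PySem.Set.diff (l2n.getD lc.1 PySem.Set.empty) lc.2) : List String).contains q.1)))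
      ∧ ∀ l, (cs.foldl (fun p lc =>
          ((PySem.Set.diff (p.2.getD lc.1 PySem.Set.empty) lc.2).foldl
              (fun m prev => m.erase prev) p.1,
           p.2.insert lc.1 lc.2)) (m, l2n)).2.getD l PySem.Set.empty
          = match cs.find? (fun lc => lc.1 == l) with
            | some lc => lc.2
            | none => l2n.getD l PySem.Set.empty := by
  induction cs with
  | nil =>
    intro m l2n _
    refine ⟨by simp, fun l => by simp⟩
  | cons lc rest ih =>
    intro m l2n hnd
    simp only [List.map_cons, List.nodup_cons] at hnd
    obtain ⟨hnotin, hndr⟩ := hnd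
    rw [List.foldl_cons]
    obtain ⟨ih1, ih2⟩ := ih ((PySem.Set.diff (l2n.getD lc.1 PySem.Set.empty) lc.2).foldl
              (fun m prev => m.erase prev) m) (l2n.insert lc.1 lc.2) hndr
    have hrest : ∀ lc' ∈ rest,
        ((l2n.insert lc.1 lc.2).getD lc'.1 PySem.Set.empty) = l2n.getD lc'.1 PySem.Set.empty := by
      intro lc' h
      rw [PySem.Dict.getD_insert, if_neg]
      intro he
      exact hnotin (he ▸ List.mem_map_of_mem h)
    constructor
    · rw [ih1, pvFoldlErase, List.filter_filter]
      apply List.filter_congr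
      intro q _
      have hany : rest.any (fun lc' =>
            ((PySem.Set.diff ((l2n.insert lc.1 lc.2).getD lc'.1 PySem.Set.empty) lc'.2) : List String).contains q.1)
          = rest.any (fun lc' =>
            ((PySem.Set.diff (l2n.getD lc'.1 PySem.Set.empty) lc'.2) : List String).contains q.1) :=
        pvAnyCongr _ _ _ (fun lc' h => by rw [hrest lc' h])
      rw [hany, List.any_cons, Bool.not_or]
      exact Bool.and_comm _ _
    · intro l
      rw [ih2 l]
      by_cases hl : lc.1 = l
      · rw [List.find?_cons_of_pos (by simp [hl])]
        cases hfind : rest.find? (fun lc' => lc'.1 == l) with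
        | none => rw [PySem.Dict.getD_insert, if_pos hl.symm]
        | some lc' =>
          exfalso
          have h1 : lc'.1 = l := by simpa using List.find?_some hfind
          exact hnotin (by
            rw [hl, ← h1]
            exact List.mem_map_of_mem (List.mem_of_find?_eq_some hfind))
      · rw [List.find?_cons_of_neg (by simp [hl])]
        cases hfind : rest.find? (fun lc' => lc'.1 == l) with
        | none => rw [PySem.Dict.getD_insert, if_neg (fun h => hl h.symm)]
        | some lc' => rfl
theorem pvContainsEq (l : List String) (x : String) : l.contains x = decide (x ∈ l) := by
  by_cases h : x ∈ l <;> simp [h]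

theorem pvSetOfListContains (L : List String) (x : String) :
    PySem.Set.contains (PySem.Set.ofList L) x = decide (x ∈ L) := by
  have : PySem.Set.contains (PySem.Set.ofList L) x = List.contains (PySem.Set.ofList L) x := rfl
  rw [this, pvContainsEq]
  by_cases h : x ∈ L <;> simp [PySem.Set.mem_ofList, h]

theorem pvSetContainsEq (s : PySem.Set String) (x : String) :
    PySem.Set.contains s x = decide (x ∈ s) := by
  show List.contains s x = _
  exact pvContainsEq s x

theorem pvDictContains (m : PySem.Dict String String) (x : String) :
    m.contains x = decide (x ∈ m.keys) := by
  rw [PySem.Dict.contains_eq_decide_mem_keys]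

-- one non-empty header map: A's step equals B's step and the invariant is maintained
theorem pvStep (items : List (String × String)) (m : PySem.Dict String String)
    (l2n : PySem.Dict String (PySem.Set String))
    (hnil : items ≠ [])
    (hitems : (items.map Prod.fst).Nodup) (hm : m.keys.Nodup)
    (hinv : ∀ l n, n ∈ l2n.getD l PySem.Set.empty ↔ n ∈ m.keys ∧ PySem.Str.lower n = l) :
    (mergeA_step (m, l2n) (some items)).1.items = mergeB_step m.items (some items)
    ∧ (mergeA_step (m, l2n) (some items)).1.keys.Nodup
    ∧ (∀ l n, n ∈ (mergeA_step (m, l2n) (some items)).2.getD l PySem.Set.empty ↔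
        n ∈ (mergeA_step (m, l2n) (some items)).1.keys ∧ PySem.Str.lower n = l) := by
  have hA : mergeA_step (m, l2n) (some items)
      = ((items.foldl (fun c nv =>
            c.modify (PySem.Str.lower nv.1) PySem.Set.empty (fun s => PySem.Set.add s nv.1))
            PySem.Dict.empty).items.foldl
          (fun p lc =>
            ((PySem.Set.diff (p.2.getD lc.1 PySem.Set.empty) lc.2).foldl
                (fun m prev => m.erase prev) p.1,
             p.2.insert lc.1 lc.2))
          (items.foldl (fun m nv => m.insert nv.1 nv.2) m, l2n)) := by
    simp only [mergeA_step, if_neg hnil]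
    rw [pvFoldlPair (fun (a : PySem.Dict String String) (nv : String × String) => a.insert nv.1 nv.2)
        (fun (c : PySem.Dict String (PySem.Set String)) (nv : String × String) =>
          c.modify (PySem.Str.lower nv.1) PySem.Set.empty (fun s => PySem.Set.add s nv.1)) items m PySem.Dict.empty]
  
  set CUR := items.foldl (fun c nv =>
      c.modify (PySem.Str.lower nv.1) PySem.Set.empty (fun s => PySem.Set.add s nv.1))
      PySem.Dict.empty with hCUR
  set M1 := items.foldl (fun m nv => m.insert nv.1 nv.2) m with hM1
  have hcurnd : (CUR.items.map Prod.fst).Nodup := by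
    have := PySem.Dict.nodup_keys_foldl_modify_key items (fun nv => PySem.Str.lower nv.1)
      PySem.Set.empty (fun _ nv => fun s => PySem.Set.add s nv.1) PySem.Dict.empty (by simp)
    exact this
  obtain ⟨hph1, hph2⟩ := pvPhase2 CUR.items M1 l2n hcurnd
  have hcurmem : ∀ l x, x ∈ CUR.getD l PySem.Set.empty ↔
      (x ∈ items.map Prod.fst ∧ PySem.Str.lower x = l) := by
    intro l x
    rw [hCUR, pvCurGetD]
    simp [PySem.Dict.getD_empty, PySem.Set.empty]
  have hcurkeysmem : ∀ l, l ∈ CUR.keys ↔ l ∈ items.map (fun nv => PySem.Str.lower nv.1) := by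
    intro l
    rw [hCUR, pvCurKeys]
    simp [PySem.Dict.keys_empty]
  
  have hkey : ∀ x : String,
      ((CUR.items.any (fun lc =>
          ((PySem.Set.diff (l2n.getD lc.1 PySem.Set.empty) lc.2) : List String).contains x)) = true)
      ↔ (x ∈ m.keys ∧ PySem.Str.lower x ∈ items.map (fun nv => PySem.Str.lower nv.1)
          ∧ x ∉ items.map Prod.fst) := by
    intro x
    rw [List.any_eq_true]
    constructor
    · rintro ⟨lc, hlc, hcont⟩
      rw [pvSetContainsEq] at hcont
      have hdm : x ∈ PySem.Set.diff (l2n.getD lc.1 PySem.Set.empty) lc.2 := by simpa using hcont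
      unfold PySem.Set.diff at hdm
      rw [List.mem_filter] at hdm
      obtain ⟨hx1, hx2b⟩ := hdm
      have hx2 : x ∉ lc.2 := by
        rw [Bool.not_eq_eq_eq_not, Bool.not_true,
          pvSetContainsEq] at hx2b
        simpa using hx2b
      obtain ⟨hxm, hlow⟩ := (hinv lc.1 x).mp hx1
      refine ⟨hxm, ?_, ?_⟩
      · rw [hlow]
        exact (hcurkeysmem lc.1).mp (PySem.Dict.mem_keys_of_mem_items _ hlc)
      · intro hik
        apply hx2
        have hpair : (lc.1, lc.2) ∈ CUR.items := by rwa [Prod.mk.eta]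
        have hlc2 : CUR.getD lc.1 PySem.Set.empty = lc.2 :=
          PySem.Dict.getD_of_mem_items _ hpair hcurnd _
        rw [← hlc2, hcurmem]
        exact ⟨hik, hlow⟩
    · rintro ⟨hxm, hlowm, hxik⟩
      have hlk : PySem.Str.lower x ∈ CUR.keys := (hcurkeysmem _).mpr hlowm
      cases hg : CUR.get? (PySem.Str.lower x) with
      | none =>
        exact absurd hlk ((PySem.Dict.get?_eq_none_iff_not_mem_keys _ _).mp hg)
      | some s =>
        refine ⟨(PySem.Str.lower x, s), PySem.Dict.mem_items_of_get?_eq_some _ hg, ?_⟩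
        rw [pvSetContainsEq]
        have hin : x ∈ PySem.Set.diff (l2n.getD (PySem.Str.lower x) PySem.Set.empty) s := by
          unfold PySem.Set.diff
          rw [List.mem_filter]
          refine ⟨(hinv _ x).mpr ⟨hxm, rfl⟩, ?_⟩
          have hs : CUR.getD (PySem.Str.lower x) PySem.Set.empty = s :=
            PySem.Dict.getD_of_get?_eq_some _ _ hg
          rw [Bool.not_eq_eq_eq_not, Bool.not_true, pvSetContainsEq]
          simp only [decide_eq_false_iff_not]
          rw [← hs, hcurmem]
          rintro ⟨h1, _⟩
          exact hxik h1
        simpa using hin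
  
  have hanyfalse : ∀ x : String, x ∈ items.map Prod.fst →
      (CUR.items.any (fun lc =>
        ((PySem.Set.diff (l2n.getD lc.1 PySem.Set.empty) lc.2) : List String).contains x)) = false := by
    intro x hx
    cases h : (CUR.items.any (fun lc =>
        ((PySem.Set.diff (l2n.getD lc.1 PySem.Set.empty) lc.2) : List String).contains x)) with
    | false => rfl
    | true => exact absurd hx ((hkey x).mp h).2.2
  have hPB : ∀ x : String, x ∈ m.keys →
      (!(CUR.items.any (fun lc =>
        ((PySem.Set.diff (l2n.getD lc.1 PySem.Set.empty) lc.2) : List String).contains x)))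
      = (decide (x ∈ items.map Prod.fst)
         || !decide (PySem.Str.lower x ∈ items.map (fun nv => PySem.Str.lower nv.1))) := by
    intro x hx
    by_cases h1 : x ∈ items.map Prod.fst
    · rw [hanyfalse x h1]
      simp [h1]
    · by_cases h2 : PySem.Str.lower x ∈ items.map (fun nv => PySem.Str.lower nv.1)
      · rw [(hkey x).mpr ⟨hx, h2, h1⟩]
        simp [h1, h2]
      · have hfalse : (CUR.items.any (fun lc =>
            ((PySem.Set.diff (l2n.getD lc.1 PySem.Set.empty) lc.2) : List String).contains x)) = false := by
          cases h : (CUR.items.any (fun lc =>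
              ((PySem.Set.diff (l2n.getD lc.1 PySem.Set.empty) lc.2) : List String).contains x)) with
          | false => rfl
          | true => exact absurd ((hkey x).mp h).2.1 h2
        rw [hfalse]
        simp [h1, h2]
  
  -- B's comprehension over the old merged entries
  have hf : ∀ q ∈ m.items,
      (fun nv : String × String =>
        match (PySem.Dict.mk items).get? nv.1 with
        | some w => some (nv.1, w)
        | none =>
          if PySem.Set.contains (PySem.Set.ofList (items.map (fun nv => PySem.Str.lower nv.1)))
              (PySem.Str.lower nv.1) then none
          else some nv) q
      = if (decide (q.1 ∈ items.map Prod.fst)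
            || !decide (PySem.Str.lower q.1 ∈ items.map (fun nv => PySem.Str.lower nv.1)))
        then some (pvUpd items q) else none := by
    intro q _
    have hget : (PySem.Dict.mk items).get? q.1
        = (items.find? (fun p => p.1 == q.1)).map (fun p => p.2) := rfl
    simp only [hget]
    cases hfind : items.find? (fun p => p.1 == q.1) with
    | some p =>
      have hp1 : p.1 = q.1 := by simpa using List.find?_some hfind
      have hmem : q.1 ∈ items.map Prod.fst :=
        hp1 ▸ List.mem_map_of_mem (List.mem_of_find?_eq_some hfind)
      have hupd : pvUpd items q = (q.1, p.2) := by
        unfold pvUpd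
        rw [hfind]
      simp [hmem, hupd]
    | none =>
      have hno : q.1 ∉ items.map Prod.fst := by
        rw [List.find?_eq_none] at hfind
        intro hmem
        obtain ⟨p, hp, hpe⟩ := List.mem_map.mp hmem
        exact hfind p hp (by simp [hpe])
      have hupd : pvUpd items q = q := pvUpd_of_not_mem items q hno
      rw [pvSetOfListContains]
      by_cases h2 : PySem.Str.lower q.1 ∈ items.map (fun nv => PySem.Str.lower nv.1) <;>
        simp [h2, hno, hupd]
  
  have hM1items : M1.items = m.items.map (pvUpd items)
      ++ items.filter (fun nv => !(m.contains nv.1)) := pvFoldlInsert items m hitems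
  -- the merged list after A's step, in B's shape
  have hlist : (mergeA_step (m, l2n) (some items)).1.items
      = (m.items.filter (fun q => decide (q.1 ∈ items.map Prod.fst)
            || !decide (PySem.Str.lower q.1 ∈ items.map (fun nv => PySem.Str.lower nv.1)))).map (pvUpd items)
        ++ items.filter (fun nv => !(m.contains nv.1)) := by
    rw [hA, hph1, hM1items, List.filter_append]
    congr 1
    · rw [List.filter_map]
      congr 1
      apply List.filter_congr
      intro q hq
      simp only [Function.comp_apply, pvUpd_fst]
      exact hPB q.1 (List.mem_map_of_mem hq)
    · rw [List.filter_filter]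
      apply List.filter_congr
      intro nv hnv
      rw [hanyfalse nv.1 (List.mem_map_of_mem hnv)]
      simp
  
  have hB : mergeB_step m.items (some items)
      = (m.items.filter (fun q => decide (q.1 ∈ items.map Prod.fst)
            || !decide (PySem.Str.lower q.1 ∈ items.map (fun nv => PySem.Str.lower nv.1)))).map (pvUpd items)
        ++ items.filter (fun nv => !(m.contains nv.1)) := by
    simp only [mergeB_step, if_neg hnil]
    rw [pvFilterMapEq _ _ _ m.items hf]
    congr 1
    apply List.filter_congr
    intro nv hnv
    rw [pvSetOfListContains, pvDictContains]
    have hseen : nv.1 ∈ ((m.items.filter (fun q => decide (q.1 ∈ items.map Prod.fst)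
            || !decide (PySem.Str.lower q.1 ∈ items.map (fun nv => PySem.Str.lower nv.1)))).map (pvUpd items)).map
              (fun nv => nv.1)
        ↔ nv.1 ∈ m.keys := by
      rw [List.map_map]
      constructor
      · intro h
        obtain ⟨q, hq, he⟩ := List.mem_map.mp h
        rw [List.mem_filter] at hq
        have : q.1 = nv.1 := by simpa [pvUpd_fst] using he
        exact this ▸ List.mem_map_of_mem hq.1
      · intro h
        obtain ⟨q, hq, hq1⟩ := List.mem_map.mp h
        refine List.mem_map.mpr ⟨q, List.mem_filter.mpr ⟨hq, ?_⟩, by simpa [pvUpd_fst] using hq1⟩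
        have : q.1 ∈ items.map Prod.fst := hq1 ▸ List.mem_map_of_mem hnv
        simp [this]
    simp only [hseen]
  
  have hkeys_iff : ∀ (d : PySem.Dict String String) (x : String),
      x ∈ d.keys ↔ ∃ q ∈ d.items, q.1 = x := by
    intro d x
    show x ∈ d.items.map _ ↔ _
    rw [List.mem_map]
  have hrkeys : (mergeA_step (m, l2n) (some items)).1.keys
      = (m.items.filter (fun q => decide (q.1 ∈ items.map Prod.fst)
            || !decide (PySem.Str.lower q.1 ∈ items.map (fun nv => PySem.Str.lower nv.1)))).map Prod.fst
        ++ (items.filter (fun nv => !(m.contains nv.1))).map Prod.fst := by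
    show ((mergeA_step (m, l2n) (some items)).1.items).map Prod.fst = _
    rw [hlist, List.map_append, List.map_map]
    congr 1
    apply List.map_congr_left
    intro q _
    exact pvUpd_fst items q
  have hlowof : ∀ x, x ∈ items.map Prod.fst →
      PySem.Str.lower x ∈ items.map (fun nv => PySem.Str.lower nv.1) := by
    intro x hx
    obtain ⟨nv, hnv, rfl⟩ := List.mem_map.mp hx
    exact List.mem_map_of_mem hnv
  have hrmem : ∀ x, x ∈ (mergeA_step (m, l2n) (some items)).1.keys ↔
      ((x ∈ m.keys ∧ (x ∈ items.map Prod.fst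
          ∨ PySem.Str.lower x ∉ items.map (fun nv => PySem.Str.lower nv.1)))
        ∨ (x ∈ items.map Prod.fst ∧ x ∉ m.keys)) := by
    intro x
    rw [hrkeys, List.mem_append]
    constructor
    · rintro (h | h)
      · obtain ⟨q, hq, rfl⟩ := List.mem_map.mp h
        rw [List.mem_filter] at hq
        have h2 := hq.2
        simp only [Bool.or_eq_true, decide_eq_true_eq, Bool.not_eq_eq_eq_not, Bool.not_true,
          decide_eq_false_iff_not] at h2
        by_cases hmk : q.1 ∈ m.keys
        · exact Or.inl ⟨hmk, h2⟩
        · exact absurd ((hkeys_iff m q.1).mpr ⟨q, hq.1, rfl⟩) hmk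
      · obtain ⟨nv, hnv, rfl⟩ := List.mem_map.mp h
        rw [List.mem_filter] at hnv
        have h2 := hnv.2
        rw [pvDictContains] at h2
        simp only [Bool.not_eq_eq_eq_not, Bool.not_true, decide_eq_false_iff_not] at h2
        exact Or.inr ⟨List.mem_map_of_mem hnv.1, h2⟩
    · rintro (⟨hmk, hcond⟩ | ⟨hik, hmk⟩)
      · obtain ⟨q, hq, rfl⟩ := (hkeys_iff m x).mp hmk
        refine Or.inl (List.mem_map.mpr ⟨q, List.mem_filter.mpr ⟨hq, ?_⟩, rfl⟩)
        simp only [Bool.or_eq_true, decide_eq_true_eq, Bool.not_eq_eq_eq_not, Bool.not_true,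
          decide_eq_false_iff_not]
        exact hcond
      · obtain ⟨nv, hnv, rfl⟩ := List.mem_map.mp hik
        refine Or.inr (List.mem_map.mpr ⟨nv, List.mem_filter.mpr ⟨hnv, ?_⟩, rfl⟩)
        rw [pvDictContains]
        simp [hmk]
  refine ⟨by rw [hlist, hB], ?_, ?_⟩
  · -- keys of the result are distinct
    rw [hrkeys]
    apply List.Nodup.append
    · exact hm.sublist (List.filter_sublist.map Prod.fst)
    · exact hitems.sublist (List.filter_sublist.map Prod.fst)
    · intro x hx1 hx2
      obtain ⟨nv, hnv, rfl⟩ := List.mem_map.mp hx2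
      rw [List.mem_filter, pvDictContains] at hnv
      have h2 := hnv.2
      simp only [Bool.not_eq_eq_eq_not, Bool.not_true, decide_eq_false_iff_not] at h2
      apply h2
      obtain ⟨q, hq, he⟩ := List.mem_map.mp hx1
      rw [List.mem_filter] at hq
      exact (hkeys_iff m nv.1).mpr ⟨q, hq.1, he⟩
  · -- the lower_to_names invariant is maintained
    intro l n
    rw [hA, hph2 l]
    cases hfind : CUR.items.find? (fun lc => lc.1 == l) with
    | some lc =>
      have hl1 : lc.1 = l := by simpa using List.find?_some hfind
      have hlcmem : lc ∈ CUR.items := List.mem_of_find?_eq_some hfind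
      have hpair : (lc.1, lc.2) ∈ CUR.items := by rwa [Prod.mk.eta]
      have hgd : CUR.getD lc.1 PySem.Set.empty = lc.2 :=
        PySem.Dict.getD_of_mem_items _ hpair hcurnd _
      have hmem2 : ∀ x, x ∈ lc.2 ↔ (x ∈ items.map Prod.fst ∧ PySem.Str.lower x = l) := by
        intro x
        rw [← hgd, hcurmem, hl1]
      have hlmap : l ∈ items.map (fun nv => PySem.Str.lower nv.1) :=
        hl1 ▸ (hcurkeysmem lc.1).mp (PySem.Dict.mem_keys_of_mem_items _ hlcmem)
      rw [hmem2 n, ← hA, hrmem n]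
      constructor
      · rintro ⟨hik, hlow⟩
        refine ⟨?_, hlow⟩
        by_cases hmk : n ∈ m.keys
        · exact Or.inl ⟨hmk, Or.inl hik⟩
        · exact Or.inr ⟨hik, hmk⟩
      · rintro ⟨hkmem, hlow⟩
        refine ⟨?_, hlow⟩
        rcases hkmem with ⟨_, hik | hnl⟩ | ⟨hik, _⟩
        · exact hik
        · exact absurd (hlow ▸ hlmap) hnl
        · exact hik
    | none =>
      have hnotlow : l ∉ items.map (fun nv => PySem.Str.lower nv.1) := by
        intro h
        have hck : l ∈ CUR.keys := (hcurkeysmem l).mpr h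
        obtain ⟨lc, hlc, hle⟩ := List.mem_map.mp hck
        rw [List.find?_eq_none] at hfind
        exact hfind lc hlc (by simp [hle])
      rw [hinv l n, ← hA, hrmem n]
      constructor
      · rintro ⟨hmk, hlow⟩
        refine ⟨Or.inl ⟨hmk, Or.inr ?_⟩, hlow⟩
        rw [hlow]
        exact hnotlow
      · rintro ⟨hkmem, hlow⟩
        refine ⟨?_, hlow⟩
        rcases hkmem with ⟨hmk, _⟩ | ⟨hik, _⟩
        · exact hmk
        · exact absurd (hlow ▸ hlowof n hik) hnotlow

-- the whole fold: A's state stays linked to B's list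
theorem pvMain (hs : List (Option (List (String × String)))) :
    ∀ (m : PySem.Dict String String) (l2n : PySem.Dict String (PySem.Set String)),
      (∀ o ∈ hs, ((o.getD []).map Prod.fst).Nodup) → m.keys.Nodup →
      (∀ l n, n ∈ l2n.getD l PySem.Set.empty ↔ n ∈ m.keys ∧ PySem.Str.lower n = l) →
      (hs.foldl mergeA_step (m, l2n)).1.items = hs.foldl mergeB_step m.items := by
  induction hs with
  | nil => intro m l2n _ _ _; rfl
  | cons o rest ih =>
    intro m l2n hpre hm hinv
    have hpre' : ∀ o' ∈ rest, ((o'.getD []).map Prod.fst).Nodup :=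
      fun o' h => hpre o' (by simp [h])
    cases o with
    | none =>
      rw [List.foldl_cons, List.foldl_cons]
      have hAn : mergeA_step (m, l2n) none = (m, l2n) := rfl
      have hBn : mergeB_step m.items none = m.items := rfl
      rw [hAn, hBn]
      exact ih m l2n hpre' hm hinv
    | some items =>
      by_cases hnil : items = []
      · subst hnil
        rw [List.foldl_cons, List.foldl_cons]
        have hAn : mergeA_step (m, l2n) (some []) = (m, l2n) := rfl
        have hBn : mergeB_step m.items (some []) = m.items := rfl
        rw [hAn, hBn]
        exact ih m l2n hpre' hm hinv
      · obtain ⟨h1, h2, h3⟩ := pvStep items m l2n hnil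
          (by simpa using hpre (some items) (by simp)) hm hinv
        rw [List.foldl_cons, List.foldl_cons, ← h1]
        rw [show mergeA_step (m, l2n) (some items)
            = ((mergeA_step (m, l2n) (some items)).1, (mergeA_step (m, l2n) (some items)).2) from rfl]
        exact ih _ _ hpre' h2 h3

-- ===== VERDICT (by name: the statement is the Claim_ definition above) =====
theorem merge_headers_case_insensitively_py_spec : Claim_equal_merge_headers_case_insensitively_py := by
  intro headers _ hpre
  unfold Spec_merge_headers_case_insensitively_py
  unfold merge_headers_case_insensitively_py merge_headers_case_insensitively_py_alt
  exact pvMain headers PySem.Dict.empty PySem.Dict.empty hpre (by simp)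
    (by intro l n
        simp [PySem.Dict.getD_empty, PySem.Dict.keys_empty, PySem.Set.empty])
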